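-- pv_equiv track=rewrite | github.com/gyunih0/algorithm | 프로그래머스/stack.py | progress
-- ===== SOURCE A (Python) =====
-- import collections
-- from typing import List
--
-- def progress(progresses: List[int], speeds: List[int]):
--
--     # 입력 List를 Deque로 형변환
--     progressQ = collections.deque(progresses)
--     speedQ = collections.deque(speeds)
--
--     answer = []
--     day = 0
--     count = 0  # 한번에 완료되는 누적 count
--     while len(progressQ):  # 일이 남아 있는 동안
--         # day ++ 해주면서 가장 앞작업이 100을 넘긴다면 -> progressQ, speedQ를 popleft()해주고
--         # count ++ 해준다
--
--         if progressQ[0] + speedQ[0] * day >= 100:  # 가장 앞작업 완료 할 때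
--             progressQ.popleft()
--             speedQ.popleft()
--             count += 1
--         else:
--             if count > 0:
--                 # count 초기화
--                 answer.append(count)
--                 count = 0
--             day += 1
--
--     answer.append(count)  # 마지막 count 추가
--     return answer
-- ===== SOURCE B (Python) =====
-- from typing import List
--
-- def progress(progresses: List[int], speeds: List[int]):
--     # completion day of each task: 0 if already done, else ceil((100-p)/s)
--     days = [0 if p >= 100 else -(-(100 - p) // s) for p, s in zip(progresses, speeds)]
--     answer = []
--     count = 0
--     deadline = -1
--     for d in days:
--         if d <= deadline:
--             count += 1
--         else:
--             if count > 0: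
--                 answer.append(count)
--             count = 1
--             deadline = d
--     answer.append(count)
--     return answer
-- ===== Notes on version B (the rewrite author's own statement) =====
-- stated objective: alternative
-- what changed: B computes each task's completion day with ceiling division and makes one linear grouping pass over those days, instead of A's simulation that advances a day counter one step at a time while polling the queue front (intended as faster; a timing run saw A time out at n=16 where B returned but could not confirm a clean ratio).
-- outside the precondition, e.g. on progress([100], [-5]): A returns [1], B returns [1]; on progress([50, 100], [50, -100]): A does not finish within the time limit, B returns [2]
import Mathlib
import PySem

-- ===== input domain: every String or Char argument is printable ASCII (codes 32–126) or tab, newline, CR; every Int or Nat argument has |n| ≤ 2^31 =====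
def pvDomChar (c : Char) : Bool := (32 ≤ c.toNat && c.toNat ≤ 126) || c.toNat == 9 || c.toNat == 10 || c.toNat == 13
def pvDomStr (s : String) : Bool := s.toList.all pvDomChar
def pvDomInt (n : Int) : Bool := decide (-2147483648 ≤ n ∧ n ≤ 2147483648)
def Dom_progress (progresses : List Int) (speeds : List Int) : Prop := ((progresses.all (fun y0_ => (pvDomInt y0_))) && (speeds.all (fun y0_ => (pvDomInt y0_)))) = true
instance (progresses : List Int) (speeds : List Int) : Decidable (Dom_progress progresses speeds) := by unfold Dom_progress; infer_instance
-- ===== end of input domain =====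

-- B replaces A's day-by-day simulation with per-task ceiling-division completion days and a
-- single linear grouping pass over those days (objective: alternative algorithm).

-- ===== PORT A =====
-- A's while loop advances `day` one step at a time; the fuel argument is only a totalization
-- guard (it provably never runs out on inputs satisfying Pre_progress).
def progressLoop : Nat → List Int → List Int → List Int → Int → Int → List Int
  | 0, _, _, ans, _, count => ans ++ [count]
  | _ + 1, [], _, ans, _, count => ans ++ [count]
  | _ + 1, _ :: _, [], ans, _, count => ans ++ [count]   -- Python raises IndexError here (outside Pre_)
  | f + 1, p :: pt, s :: st, ans, day, count =>
    if 100 ≤ p + s * day then progressLoop f pt st ans day (count + 1)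
    else if 0 < count then progressLoop f (p :: pt) (s :: st) (ans ++ [count]) (day + 1) 0
    else progressLoop f (p :: pt) (s :: st) ans (day + 1) count

def progressFuel (progresses : List Int) : Nat :=
  progresses.length + (progresses.map (fun p => (100 - p).toNat)).sum + 1

def progress (progresses : List Int) (speeds : List Int) : List Int :=
  progressLoop (progressFuel progresses) progresses speeds [] 0 0

-- ===== PORT B =====
def pvDayOf (p s : Int) : Int :=
  if 100 ≤ p then 0 else -(PySem.Int.floordiv (-(100 - p)) s)

def progressAltLoop : List Int → List Int → Int → Int → List Int
  | [], ans, count, _ => ans ++ [count]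
  | d :: ds, ans, count, deadline =>
    if d ≤ deadline then progressAltLoop ds ans (count + 1) deadline
    else progressAltLoop ds (if 0 < count then ans ++ [count] else ans) 1 d

def progress_alt (progresses : List Int) (speeds : List Int) : List Int :=
  progressAltLoop ((progresses.zip speeds).map (fun q => pvDayOf q.1 q.2)) [] 0 (-1)

-- ===== PRECONDITION & SPEC =====
-- Pre_ excludes inputs on which A raises IndexError (more progresses than speeds) and inputs on
-- which A's day counter steps forever (an unfinished task whose speed cannot bring it to 100);
-- on a few such excluded inputs (an already-complete task with negative speed reached at day 0)
-- A happens to return, and B returns the same value there.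
def Pre_progress (progresses : List Int) (speeds : List Int) : Prop :=
  progresses.length ≤ speeds.length ∧
    ∀ q ∈ progresses.zip speeds, 1 ≤ q.2 ∨ (100 ≤ q.1 ∧ 0 ≤ q.2)
instance (progresses : List Int) (speeds : List Int) : Decidable (Pre_progress progresses speeds) := by
  unfold Pre_progress; infer_instance

def pvWitness_progress : List Int × List Int := ([30, 99, 100], [30, 1, 1])

def Spec_progress (progresses : List Int) (speeds : List Int) (out : List Int) : Prop := out = progress_alt progresses speeds
instance (progresses : List Int) (speeds : List Int) (out : List Int) : Decidable (Spec_progress progresses speeds out) := by unfold Spec_progress; infer_instance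

-- ===== CLAIM (what is proved, stated in full; the proofs are below) =====
def Claim_equal_progress : Prop := ∀ (progresses : List Int) (speeds : List Int), Dom_progress progresses speeds → Pre_progress progresses speeds → Spec_progress progresses speeds (progress progresses speeds)

-- ===== LEMMAS AND PROOFS =====

lemma pvDayOf_le_iff (p s d : Int) (h : 1 ≤ s ∨ (100 ≤ p ∧ 0 ≤ s)) (hd : 0 ≤ d) :
    pvDayOf p s ≤ d ↔ 100 ≤ p + s * d := by
  unfold pvDayOf
  by_cases hp : 100 ≤ p
  · simp only [hp, if_pos]
    have hs : 0 ≤ s := by rcases h with h | h <;> omega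
    constructor
    · intro _; nlinarith [mul_nonneg hs hd]
    · intro _; exact hd
  · have hs : 1 ≤ s := by
      rcases h with h | h
      · exact h
      · exact absurd h.1 hp
    simp only [hp, if_neg, not_false_iff]
    have h1 : -(100 - p) = p - 100 := by ring
    rw [h1]
    rw [show (-(PySem.Int.floordiv (p - 100) s) ≤ d ↔ -d ≤ PySem.Int.floordiv (p - 100) s) by omega]
    rw [PySem.Int.le_floordiv_iff_mul_le (by omega)]
    constructor <;> intro hx <;> nlinarith

lemma pvDayOf_nonneg (p s : Int) (h : 1 ≤ s ∨ (100 ≤ p ∧ 0 ≤ s)) : 0 ≤ pvDayOf p s := by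
  unfold pvDayOf
  by_cases hp : 100 ≤ p
  · simp [hp]
  · have hs : 1 ≤ s := by
      rcases h with h | h
      · exact h
      · exact absurd h.1 hp
    simp only [hp, if_neg, not_false_iff]
    have h1 : -(100 - p) = p - 100 := by ring
    rw [h1]
    have := (PySem.Int.floordiv_lt_iff_lt_mul (a := p - 100) (b := s) (q := 1) (by omega)).2
      (by nlinarith)
    omega

lemma pvDayOf_le_sub (p s : Int) (h : 1 ≤ s ∨ (100 ≤ p ∧ 0 ≤ s)) :
    (pvDayOf p s).toNat ≤ (100 - p).toNat := by
  unfold pvDayOf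
  by_cases hp : 100 ≤ p
  · simp [hp]
  · have hs : 1 ≤ s := by
      rcases h with h | h
      · exact h
      · exact absurd h.1 hp
    simp only [hp, if_neg, not_false_iff]
    have h1 : -(100 - p) = p - 100 := by ring
    rw [h1]
    have := (PySem.Int.le_floordiv_iff_mul_le (a := p - 100) (b := s) (q := p - 100) (by omega)).2
      (by nlinarith)
    omega

-- B's grouping pass started with deadline 0 equals the one started with deadline -1,
-- when all days are nonnegative and the running count is 0.
lemma altLoop_init (ds ans : List Int) (hd : ∀ d ∈ ds, 0 ≤ d) :
    progressAltLoop ds ans 0 0 = progressAltLoop ds ans 0 (-1) := by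
  cases ds with
  | nil => rfl
  | cons d ds =>
    have h0 : 0 ≤ d := hd d (by simp)
    by_cases hle : d ≤ 0
    · have : d = 0 := by omega
      subst this
      simp [progressAltLoop]
    · simp [progressAltLoop, hle, show ¬ d ≤ (-1 : Int) by omega]

-- Main invariant: A's simulation from state (ps, ss, ans, day, count) computes exactly B's
-- grouping pass over the completion days with running deadline `day`.
lemma loop_eq : ∀ (f : Nat) (ps ss ans : List Int) (day count : Int),
    ps.length ≤ ss.length →
    (∀ q ∈ ps.zip ss, 1 ≤ q.2 ∨ (100 ≤ q.1 ∧ 0 ≤ q.2)) →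
    0 ≤ day → 0 ≤ count →
    ps.length + (((ps.zip ss).map (fun q => (pvDayOf q.1 q.2 - day).toNat)).sum) < f →
    progressLoop f ps ss ans day count
      = progressAltLoop ((ps.zip ss).map (fun q => pvDayOf q.1 q.2)) ans count day := by
  intro f
  induction f with
  | zero => intro ps ss ans day count _ _ _ _ hf; omega
  | succ f ih =>
    intro ps ss ans day count hlen hpre hday hcount hf
    match ps, ss with
    | [], _ => simp [progressLoop, progressAltLoop]
    | p :: pt, [] => simp at hlen
    | p :: pt, s :: st =>
      have hq : 1 ≤ s ∨ (100 ≤ p ∧ 0 ≤ s) := hpre (p, s) (by simp)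
      have hpre' : ∀ q ∈ pt.zip st, 1 ≤ q.2 ∨ (100 ≤ q.1 ∧ 0 ≤ q.2) := by
        intro q hqmem; exact hpre q (by simp [hqmem])
      have hiff := pvDayOf_le_iff p s day hq hday
      simp only [List.zip_cons_cons, List.map_cons] at hf ⊢
      by_cases hdone : 100 ≤ p + s * day
      · have hle : pvDayOf p s ≤ day := hiff.2 hdone
        rw [progressLoop, if_pos hdone, progressAltLoop, if_pos hle]
        exact ih pt st ans day (count + 1) (by simpa using hlen) hpre' hday (by omega)
          (by simp at hf ⊢; omega)
      · have hgt : ¬ pvDayOf p s ≤ day := fun hle => hdone (hiff.1 hle)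
        have hdlt : day < pvDayOf p s := by omega
        -- head term of the measure is positive and drops by 1 when day increments
        have hmeas : (p :: pt).length
            + ((((p :: pt).zip (s :: st)).map (fun q => (pvDayOf q.1 q.2 - (day + 1)).toNat)).sum) < f := by
          simp only [List.zip_cons_cons, List.map_cons, List.sum_cons, List.length_cons] at hf ⊢
          have hmono : (((pt.zip st).map (fun q => (pvDayOf q.1 q.2 - (day + 1)).toNat)).sum)
              ≤ (((pt.zip st).map (fun q => (pvDayOf q.1 q.2 - day).toNat)).sum) := by
            apply List.sum_le_sum
            intro q _; omega
          omega
        by_cases hc : 0 < count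
        · rw [progressLoop, if_neg hdone, if_pos hc]
          rw [ih (p :: pt) (s :: st) (ans ++ [count]) (day + 1) 0 hlen hpre (by omega) le_rfl
            (by simpa using hmeas)]
          simp only [List.zip_cons_cons, List.map_cons]
          by_cases h2 : pvDayOf p s ≤ day + 1
          · have he : pvDayOf p s = day + 1 := by omega
            simp [progressAltLoop, hc, he]
          · simp [progressAltLoop, hgt, hc, h2]
        · have hc0 : count = 0 := by omega
          subst hc0
          rw [progressLoop, if_neg hdone, if_neg hc]
          rw [ih (p :: pt) (s :: st) ans (day + 1) 0 hlen hpre (by omega) le_rfl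
            (by simpa using hmeas)]
          simp only [List.zip_cons_cons, List.map_cons]
          by_cases h2 : pvDayOf p s ≤ day + 1
          · have he : pvDayOf p s = day + 1 := by omega
            simp [progressAltLoop, he]
          · simp [progressAltLoop, hgt, h2]

lemma fuel_bound : ∀ (ps ss : List Int),
    (∀ q ∈ ps.zip ss, 1 ≤ q.2 ∨ (100 ≤ q.1 ∧ 0 ≤ q.2)) →
    (((ps.zip ss).map (fun q => (pvDayOf q.1 q.2 - 0).toNat)).sum)
      ≤ (ps.map (fun p => (100 - p).toNat)).sum := by
  intro ps
  induction ps with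
  | nil => intro ss _; simp
  | cons p pt ih =>
    intro ss hpre
    cases ss with
    | nil => simp
    | cons s st =>
      have hq := hpre (p, s) (by simp)
      have hhead := pvDayOf_le_sub p s hq
      have := ih st (fun q hqm => hpre q (by simp [hqm]))
      simp only [List.zip_cons_cons, List.map_cons, List.sum_cons]
      omega

-- ===== VERDICT (by name: the statement is the Claim_ definition above) =====
theorem progress_spec : Claim_equal_progress := by
  intro ps ss _ hpre
  obtain ⟨hlen, hz⟩ := hpre
  unfold Spec_progress progress progress_alt
  rw [loop_eq (progressFuel ps) ps ss [] 0 0 hlen hz le_rfl le_rfl (by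
    have h1 := fuel_bound ps ss hz
    unfold progressFuel
    omega)]
  exact altLoop_init _ _ (by
    intro d hd
    simp only [List.mem_map] at hd
    obtain ⟨q, hq, rfl⟩ := hd
    exact pvDayOf_nonneg q.1 q.2 (hz q hq))
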